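-- pv_equiv track=rewrite | github.com/startFromBottom/Hackerrank_problems | Graphs/Roads and Libraries.py | roadsAndLibraries
-- ===== SOURCE A (Python) =====
-- from collections import defaultdict
-- from typing import Set
--
-- def roadsAndLibraries(n, c_lib, c_road, c_cities):
--     total_cost = 0
--
--     # make bidirectional graph
--     graph = defaultdict(list)
--     for c1, c2 in c_cities:
--         graph[c1].append(c2)
--         graph[c2].append(c1)
--
--     visited = set()
--
--     def dfs(node: int, v: Set) -> Set:
--         for k in graph[node]:
--             if k not in visited:
--                 visited.add(k)
--                 v.add(k)
--                 v = dfs(k, v)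
--         return v
--
--     for c in graph:
--         if c not in visited:
--             group = dfs(c, set())
--             l = len(group)
--             # add cost for each group
--             total_cost += min(c_lib + (l - 1) * c_road, c_lib * l)
--
--     # finally, add isolated cities cost(library cost)
--     total_cost += (n - len(visited)) * c_lib
--
--     return total_cost
-- ===== SOURCE B (Python) =====
-- from collections import defaultdict, deque
--
-- def roadsAndLibraries(n, c_lib, c_road, c_cities):
--     # build bidirectional adjacency
--     graph = defaultdict(list)
--     for c1, c2 in c_cities:
--         graph[c1].append(c2)
--         graph[c2].append(c1)
--
--     visited = set()
--     total = 0
--     for c in graph: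
--         if c not in visited:
--             before = len(visited)
--             queue = deque([c])
--             while queue:
--                 node = queue.popleft()
--                 for k in graph[node]:
--                     if k not in visited:
--                         visited.add(k)
--                         queue.append(k)
--             l = len(visited) - before
--             total += c_lib + (l - 1) * min(c_road, c_lib)
--     return total + (n - len(visited)) * c_lib
-- ===== Notes on version B (the rewrite author's own statement) =====
-- stated objective: alternative
-- what changed: The recursive DFS with a mutated per-component group set is replaced by an iterative BFS with an explicit deque, the component size is obtained as the growth of the visited set instead of a separately maintained group set, and the per-component cost min(c_lib+(l-1)*c_road, c_lib*l) is algebraically collapsed to c_lib+(l-1)*min(c_road,c_lib).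
import Mathlib
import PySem

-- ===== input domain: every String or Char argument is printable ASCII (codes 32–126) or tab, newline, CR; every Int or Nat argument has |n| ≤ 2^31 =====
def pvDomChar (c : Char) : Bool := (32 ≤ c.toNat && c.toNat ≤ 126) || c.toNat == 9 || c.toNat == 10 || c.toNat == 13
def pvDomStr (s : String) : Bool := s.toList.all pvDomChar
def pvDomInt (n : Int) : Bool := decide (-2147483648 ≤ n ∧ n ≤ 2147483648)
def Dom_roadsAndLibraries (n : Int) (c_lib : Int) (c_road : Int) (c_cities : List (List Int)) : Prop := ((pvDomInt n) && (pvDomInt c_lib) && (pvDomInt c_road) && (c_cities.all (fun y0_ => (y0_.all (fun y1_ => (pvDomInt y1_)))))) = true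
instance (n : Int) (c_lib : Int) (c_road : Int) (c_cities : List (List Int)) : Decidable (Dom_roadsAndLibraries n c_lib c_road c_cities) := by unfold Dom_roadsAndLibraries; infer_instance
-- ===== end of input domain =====

-- B replaces A's recursive DFS + per-component group set by an iterative BFS queue,
-- measures the component by the growth of the visited set, and collapses the cost
-- formula to c_lib + (l-1)*min(c_road, c_lib); same return value on all inputs in Pre_.

-- ===== PORT A =====
-- shared graph building (both Pythons build the defaultdict the same way)
def pvStep (d : PySem.Dict Int (List Int)) (r : List Int) : PySem.Dict Int (List Int) :=
  match r with
  | [c1, c2] => (d.modify c1 [] (fun l => l ++ [c2])).modify c2 [] (fun l => l ++ [c1])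
  | _ => d   -- unreachable under Pre_ (Python raises ValueError on the unpack)

def pvGraph (es : List (List Int)) : PySem.Dict Int (List Int) :=
  es.foldl pvStep PySem.Dict.empty

def pvAdj (g : PySem.Dict Int (List Int)) (x : Int) : List Int := g.getD x []

-- termination infrastructure for the two graph searches (used by decreasing_by only)
def pvUniv (g : PySem.Dict Int (List Int)) : Finset Int := g.values.flatten.toFinset

def pvMeas (g : PySem.Dict Int (List Int)) (vis : List Int) : Nat :=
  (pvUniv g \ vis.toFinset).card

def pvMaxAdj (g : PySem.Dict Int (List Int)) : Nat :=
  (g.values.map List.length).foldr max 0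

theorem pvAdj_subset_univ (g : PySem.Dict Int (List Int)) (node : Int) :
    ∀ k ∈ pvAdj g node, k ∈ pvUniv g := by
  intro k hk
  unfold pvAdj at hk
  rw [PySem.Dict.getD_eq_get?_getD] at hk
  cases h : g.get? node with
  | none => rw [h] at hk; simp at hk
  | some l =>
      rw [h] at hk
      simp only [Option.getD_some] at hk
      have hmem := PySem.Dict.mem_items_of_get?_eq_some g h
      have hv : l ∈ g.values := by
        simp only [PySem.Dict.values]
        exact List.mem_map_of_mem hmem
      unfold pvUniv
      rw [List.mem_toFinset]
      exact List.mem_flatten.mpr ⟨l, hv, hk⟩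

theorem pvFoldrMax_le {xs : List Nat} {x : Nat} (h : x ∈ xs) : x ≤ xs.foldr max 0 := by
  induction xs with
  | nil => simp at h
  | cons a t ih =>
      rcases List.mem_cons.mp h with rfl | h'
      · exact le_max_left _ _
      · exact le_trans (ih h') (le_max_right _ _)

theorem pvAdjLen_le (g : PySem.Dict Int (List Int)) (node : Int) :
    (pvAdj g node).length ≤ pvMaxAdj g := by
  unfold pvAdj
  rw [PySem.Dict.getD_eq_get?_getD]
  cases h : g.get? node with
  | none => simp
  | some l =>
      simp only [Option.getD_some]
      have hmem := PySem.Dict.mem_items_of_get?_eq_some g h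
      have hv : l ∈ g.values := by
        simp only [PySem.Dict.values]
        exact List.mem_map_of_mem hmem
      exact pvFoldrMax_le (List.mem_map_of_mem hv)

theorem pvMeas_le_of_subset (g : PySem.Dict Int (List Int)) {vis vis' : List Int}
    (h : ∀ x ∈ vis, x ∈ vis') : pvMeas g vis' ≤ pvMeas g vis := by
  apply Finset.card_le_card
  intro a ha
  rw [Finset.mem_sdiff] at ha ⊢
  exact ⟨ha.1, fun hm => ha.2 (List.mem_toFinset.mpr (h a (List.mem_toFinset.mp hm)))⟩

theorem pvMeas_append_one (g : PySem.Dict Int (List Int)) {vis : List Int} {k : Int}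
    (hu : k ∈ pvUniv g) (hk : k ∉ vis) : pvMeas g (vis ++ [k]) + 1 = pvMeas g vis := by
  unfold pvMeas
  have h1 : (vis ++ [k]).toFinset = insert k vis.toFinset := by
    simp [List.toFinset_append]
  rw [h1]
  have h2 : pvUniv g \ insert k vis.toFinset = (pvUniv g \ vis.toFinset).erase k := by
    ext a; simp [Finset.mem_sdiff, Finset.mem_erase]; tauto
  rw [h2]
  rw [Finset.card_erase_of_mem]
  · have : 0 < (pvUniv g \ vis.toFinset).card := by
      apply Finset.card_pos.mpr
      exact ⟨k, Finset.mem_sdiff.mpr ⟨hu, fun hm => hk (List.mem_toFinset.mp hm)⟩⟩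
    omega
  · exact Finset.mem_sdiff.mpr ⟨hu, fun hm => hk (List.mem_toFinset.mp hm)⟩

theorem pvMeas_append (g : PySem.Dict Int (List Int)) :
    ∀ (app vis : List Int), (∀ x ∈ app, x ∈ pvUniv g ∧ x ∉ vis) → app.Nodup →
    pvMeas g (vis ++ app) + app.length = pvMeas g vis := by
  intro app
  induction app with
  | nil => intro vis _ _; simp
  | cons a t ih =>
      intro vis h hnd
      have ha := h a (List.mem_cons_self)
      have h1 : vis ++ a :: t = (vis ++ [a]) ++ t := by simp
      rw [h1]
      have h2 := ih (vis ++ [a]) (fun x hx => by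
        have hx' := h x (List.mem_cons_of_mem _ hx)
        refine ⟨hx'.1, ?_⟩
        intro hm
        rcases List.mem_append.mp hm with hm | hm
        · exact hx'.2 hm
        · rcases List.mem_singleton.mp hm with rfl
          exact (List.nodup_cons.mp hnd).1 hx) (List.nodup_cons.mp hnd).2
      have h3 := pvMeas_append_one g ha.1 ha.2
      simp only [List.length_cons]
      omega

-- A's inner dfs: `visited` and the group set `v` threaded through the recursion;
-- the subtype carries monotonicity of `visited` (needed for termination).
mutual
def pvDfs (g : PySem.Dict Int (List Int)) (node : Int) (v vis : List Int) :
    {r : List Int × List Int // ∀ x ∈ vis, x ∈ r.2} :=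
  pvDfsGo g (pvAdj g node) (pvAdj_subset_univ g node) v vis
termination_by (pvMaxAdj g + 2) * pvMeas g vis + (pvAdj g node).length + 1
decreasing_by omega

def pvDfsGo (g : PySem.Dict Int (List Int)) (todo : List Int)
    (htodo : ∀ k ∈ todo, k ∈ pvUniv g) (v vis : List Int) :
    {r : List Int × List Int // ∀ x ∈ vis, x ∈ r.2} :=
  match todo, htodo with
  | [], _ => ⟨(v, vis), fun _ h => h⟩
  | k :: ks, htodo =>
    if hk : k ∈ vis then
      pvDfsGo g ks (fun x hx => htodo x (List.mem_cons_of_mem _ hx)) v vis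
    else
      match pvDfs g k (PySem.Set.add v k) (PySem.Set.add vis k) with
      | ⟨(v1, vis1), hmono⟩ =>
        let r2 := pvDfsGo g ks (fun x hx => htodo x (List.mem_cons_of_mem _ hx)) v1 vis1
        ⟨r2.1, fun x hx => r2.2 x (hmono x ((PySem.Set.mem_add vis k x).mpr (Or.inl hx)))⟩
termination_by (pvMaxAdj g + 2) * pvMeas g vis + todo.length
decreasing_by
  · simp only [List.length_cons]; omega
  · -- recursive dfs call on fresh k
    have hku := htodo k List.mem_cons_self
    rw [PySem.Set.add_of_not_mem hk]
    have h1 := pvMeas_append_one g hku hk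
    have h2 := pvAdjLen_le g k
    have h4 : (pvMaxAdj g + 2) * pvMeas g (vis ++ [k]) + (pvMaxAdj g + 2)
        ≤ (pvMaxAdj g + 2) * pvMeas g vis := by
      calc (pvMaxAdj g + 2) * pvMeas g (vis ++ [k]) + (pvMaxAdj g + 2)
          = (pvMaxAdj g + 2) * (pvMeas g (vis ++ [k]) + 1) := by ring
        _ ≤ (pvMaxAdj g + 2) * pvMeas g vis :=
            Nat.mul_le_mul_left _ (by omega)
    omega
  · -- continuing the loop after the recursive call
    have hku := htodo k List.mem_cons_self
    have h0 : ∀ x ∈ vis ++ [k], x ∈ vis1 := by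
      rw [← PySem.Set.add_of_not_mem hk]; exact fun x hx => hmono x hx
    have h1 := pvMeas_le_of_subset g h0
    have h2 := pvMeas_append_one g hku hk
    have h4 : (pvMaxAdj g + 2) * pvMeas g vis1 + (pvMaxAdj g + 2)
        ≤ (pvMaxAdj g + 2) * pvMeas g vis := by
      calc (pvMaxAdj g + 2) * pvMeas g vis1 + (pvMaxAdj g + 2)
          = (pvMaxAdj g + 2) * (pvMeas g vis1 + 1) := by ring
        _ ≤ (pvMaxAdj g + 2) * pvMeas g vis :=
            Nat.mul_le_mul_left _ (by omega)
    simp only [List.length_cons]; omega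
end

-- A's outer loop body (one key c)
def pvStepA (g : PySem.Dict Int (List Int)) (c_lib c_road : Int)
    (st : Int × List Int) (c : Int) : Int × List Int :=
  if PySem.Set.contains st.2 c then st
  else
    let r := (pvDfs g c PySem.Set.empty st.2).1
    let l := PySem.Set.len r.1
    (st.1 + min (c_lib + (l - 1) * c_road) (c_lib * l), r.2)

def roadsAndLibraries (n : Int) (c_lib : Int) (c_road : Int) (c_cities : List (List Int)) : Int :=
  let g := pvGraph c_cities
  let st := g.keys.foldl (pvStepA g c_lib c_road) (0, PySem.Set.empty)
  st.1 + (n - PySem.Set.len st.2) * c_lib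

-- ===== PORT B =====
-- inner `for k in graph[node]` of the BFS: extends visited and the queue
def pvScanStep (p : List Int × List Int) (k : Int) : List Int × List Int :=
  if PySem.Set.contains p.1 k then p else (PySem.Set.add p.1 k, p.2 ++ [k])

def pvScan (vis queue adj : List Int) : List Int × List Int :=
  adj.foldl pvScanStep (vis, queue)

theorem pvScan_spec (adj : List Int) : ∀ (vis queue : List Int),
    ∃ app, pvScan vis queue adj = (vis ++ app, queue ++ app)
      ∧ (∀ x ∈ app, x ∈ adj ∧ x ∉ vis) ∧ app.Nodup
      ∧ (∀ k ∈ adj, k ∈ vis ++ app) := by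
  induction adj with
  | nil => intro vis queue; exact ⟨[], by simp [pvScan], by simp, List.nodup_nil, by simp⟩
  | cons k ks ih =>
      intro vis queue
      by_cases hk : k ∈ vis
      · obtain ⟨app, heq, hmem, hnd, hcomp⟩ := ih vis queue
        refine ⟨app, ?_, ?_, hnd, ?_⟩
        · rw [← heq]
          simp [pvScan, pvScanStep, hk]
        · exact fun x hx => ⟨List.mem_cons_of_mem _ (hmem x hx).1, (hmem x hx).2⟩
        · intro j hj
          rcases List.mem_cons.mp hj with rfl | hj'
          · exact List.mem_append_left _ hk
          · exact hcomp j hj'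
      · obtain ⟨app, heq, hmem, hnd, hcomp⟩ := ih (vis ++ [k]) (queue ++ [k])
        refine ⟨k :: app, ?_, ?_, ?_, ?_⟩
        · have hc : PySem.Set.contains vis k = false := by
            by_contra h
            exact hk ((PySem.Set.contains_iff vis k).mp (by revert h; cases PySem.Set.contains vis k <;> simp))
          have : pvScan vis queue (k :: ks) = pvScan (vis ++ [k]) (queue ++ [k]) ks := by
            simp [pvScan, pvScanStep, hk, PySem.Set.add_of_not_mem hk]
          rw [this, heq]; simp
        · intro x hx
          rcases List.mem_cons.mp hx with rfl | hx'
          · exact ⟨List.mem_cons_self, hk⟩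
          · refine ⟨List.mem_cons_of_mem _ (hmem x hx').1, fun hv => (hmem x hx').2 (List.mem_append_left _ hv)⟩
        · refine List.nodup_cons.mpr ⟨fun hka => ?_, hnd⟩
          exact (hmem k hka).2 (List.mem_append_right _ (List.mem_singleton_self k))
        · intro j hj
          rcases List.mem_cons.mp hj with rfl | hj'
          · simp
          · have := hcomp j hj'
            rcases List.mem_append.mp this with h | h
            · rcases List.mem_append.mp h with h | h
              · exact List.mem_append_left _ h
              · rcases List.mem_singleton.mp h with rfl; simp
            · exact List.mem_append_right _ (List.mem_cons_of_mem _ h)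

-- B's BFS over an explicit queue
def pvBfs (g : PySem.Dict Int (List Int)) (queue vis : List Int) :
    {r : List Int // ∀ x ∈ vis, x ∈ r} :=
  match queue with
  | [] => ⟨vis, fun _ h => h⟩
  | node :: rest =>
      let p := pvScan vis rest (pvAdj g node)
      let r := pvBfs g p.2 p.1
      ⟨r.1, by
        obtain ⟨app, heq, _, _, _⟩ := pvScan_spec (pvAdj g node) vis rest
        intro x hx
        apply r.2
        show x ∈ p.1
        rw [show p = (vis ++ app, rest ++ app) from heq]
        exact List.mem_append_left _ hx⟩
termination_by 2 * pvMeas g vis + queue.length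
decreasing_by
  obtain ⟨app, heq, hmem, hnd, _⟩ := pvScan_spec (pvAdj g node) vis rest
  rw [heq]
  have h1 := pvMeas_append g app vis
    (fun x hx => ⟨pvAdj_subset_univ g node x (hmem x hx).1, (hmem x hx).2⟩) hnd
  simp only [List.length_append, List.length_cons]
  cases app with
  | nil => simp_all
  | cons a t => simp only [List.length_cons] at h1 ⊢; omega

-- B's outer loop body (one key c)
def pvStepB (g : PySem.Dict Int (List Int)) (c_lib c_road : Int)
    (st : Int × List Int) (c : Int) : Int × List Int :=
  if PySem.Set.contains st.2 c then st
  else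
    let before := PySem.Set.len st.2
    let vis' := (pvBfs g [c] st.2).1
    let l := PySem.Set.len vis' - before
    (st.1 + (c_lib + (l - 1) * min c_road c_lib), vis')

def roadsAndLibraries_alt (n : Int) (c_lib : Int) (c_road : Int) (c_cities : List (List Int)) : Int :=
  let g := pvGraph c_cities
  let st := g.keys.foldl (pvStepB g c_lib c_road) (0, PySem.Set.empty)
  st.1 + (n - PySem.Set.len st.2) * c_lib

-- ===== PRECONDITION & SPEC =====
-- Pre_ excludes rows that are not pairs: Python's `for c1, c2 in c_cities` raises
-- ValueError there (in A and in B alike).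
def Pre_roadsAndLibraries (n : Int) (c_lib : Int) (c_road : Int) (c_cities : List (List Int)) : Prop :=
  ∀ r ∈ c_cities, r.length = 2

instance (n : Int) (c_lib : Int) (c_road : Int) (c_cities : List (List Int)) :
    Decidable (Pre_roadsAndLibraries n c_lib c_road c_cities) := by
  unfold Pre_roadsAndLibraries; infer_instance

def pvWitness_roadsAndLibraries : Int × Int × Int × List (List Int) := (3, 2, 1, [[1, 2]])

def Spec_roadsAndLibraries (n : Int) (c_lib : Int) (c_road : Int) (c_cities : List (List Int)) (out : Int) : Prop := out = roadsAndLibraries_alt n c_lib c_road c_cities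
instance (n : Int) (c_lib : Int) (c_road : Int) (c_cities : List (List Int)) (out : Int) : Decidable (Spec_roadsAndLibraries n c_lib c_road c_cities out) := by unfold Spec_roadsAndLibraries; infer_instance

-- ===== CLAIM (what is proved, stated in full; the proofs are below) =====
def Claim_equal_roadsAndLibraries : Prop := ∀ (n : Int) (c_lib : Int) (c_road : Int) (c_cities : List (List Int)), Dom_roadsAndLibraries n c_lib c_road c_cities → Pre_roadsAndLibraries n c_lib c_road c_cities → Spec_roadsAndLibraries n c_lib c_road c_cities (roadsAndLibraries n c_lib c_road c_cities)

-- ===== LEMMAS AND PROOFS =====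


-- reachability in the (symmetric) adjacency structure of g
def pvReach (g : PySem.Dict Int (List Int)) : Int → Int → Prop :=
  Relation.ReflTransGen (fun u w => w ∈ pvAdj g u)

def pvClosed (g : PySem.Dict Int (List Int)) (vis : List Int) : Prop :=
  ∀ x ∈ vis, ∀ y ∈ pvAdj g x, y ∈ vis

def pvSymm (g : PySem.Dict Int (List Int)) : Prop :=
  ∀ u w, w ∈ pvAdj g u → u ∈ pvAdj g w

-- invariant bundles for the two searches
def DfsP (g : PySem.Dict Int (List Int)) (node : Int) (v vis : List Int) : Prop :=
  ∃ D, (pvDfs g node v vis).1.2 = vis ++ D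
    ∧ ((∀ x ∈ v, x ∈ vis) → (pvDfs g node v vis).1.1 = v ++ D)
    ∧ (vis.Nodup → (vis ++ D).Nodup)
    ∧ (∀ x ∈ D, pvReach g node x)
    ∧ (∀ y ∈ pvAdj g node, y ∈ vis ++ D)
    ∧ (∀ x ∈ D, ∀ y ∈ pvAdj g x, y ∈ vis ++ D)

def GoP (g : PySem.Dict Int (List Int)) (todo : List Int)
    (htodo : ∀ k ∈ todo, k ∈ pvUniv g) (v vis : List Int) : Prop :=
  ∃ D, (pvDfsGo g todo htodo v vis).1.2 = vis ++ D
    ∧ ((∀ x ∈ v, x ∈ vis) → (pvDfsGo g todo htodo v vis).1.1 = v ++ D)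
    ∧ (vis.Nodup → (vis ++ D).Nodup)
    ∧ (∀ x ∈ D, ∃ k ∈ todo, pvReach g k x)
    ∧ (∀ y ∈ todo, y ∈ vis ++ D)
    ∧ (∀ x ∈ D, ∀ y ∈ pvAdj g x, y ∈ vis ++ D)

def BfsP (g : PySem.Dict Int (List Int)) (queue vis : List Int) : Prop :=
  ∃ D, (pvBfs g queue vis).1 = vis ++ D
    ∧ (vis.Nodup → (vis ++ D).Nodup)
    ∧ (∀ x ∈ D, ∃ q ∈ queue, pvReach g q x)
    ∧ (∀ q ∈ queue, ∀ y ∈ pvAdj g q, y ∈ vis ++ D)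
    ∧ ((∀ x ∈ vis, x ∈ queue ∨ ∀ y ∈ pvAdj g x, y ∈ vis) →
        ∀ x ∈ vis ++ D, ∀ y ∈ pvAdj g x, y ∈ vis ++ D)

theorem pvDfs_from_go (g : PySem.Dict Int (List Int)) (node : Int) (v vis : List Int)
    (h : GoP g (pvAdj g node) (pvAdj_subset_univ g node) v vis) : DfsP g node v vis := by
  obtain ⟨D, h1, h2, h3, h4, h5, h6⟩ := h
  have he : (pvDfs g node v vis) = pvDfsGo g (pvAdj g node) (pvAdj_subset_univ g node) v vis := by
    rw [pvDfs]
  refine ⟨D, by rw [he]; exact h1, by rw [he]; exact h2, h3, ?_, h5, h6⟩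
  intro x hx
  obtain ⟨k, hk, hr⟩ := h4 x hx
  exact Relation.ReflTransGen.head hk hr

theorem pvDfsGo_spec (g : PySem.Dict Int (List Int)) :
    ∀ (todo : List Int) (htodo : ∀ k ∈ todo, k ∈ pvUniv g) (v vis : List Int),
      GoP g todo htodo v vis := by
  intro todo htodo v vis
  induction todo, htodo, v, vis using pvDfsGo.induct g
      (motive1 := fun node v vis => DfsP g node v vis) with
  | case1 node v vis ih => exact pvDfs_from_go g node v vis ih
  | case2 v vis htodo htodo2 =>
      exact ⟨[], by rw [pvDfsGo]; simp, by intro _; rw [pvDfsGo]; simp, by simp,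
        by simp, by simp, by simp⟩
  | case3 v vis k ks htodo hk htodo2 ih =>
      obtain ⟨D, h1, h2, h3, h4, h5, h6⟩ := ih
      have he : pvDfsGo g (k :: ks) htodo v vis
          = pvDfsGo g ks (fun x hx => htodo x (List.mem_cons_of_mem _ hx)) v vis := by
        rw [pvDfsGo]; simp [hk]
      refine ⟨D, by rw [he]; exact h1, by rw [he]; exact h2, h3, ?_, ?_, h6⟩
      · intro x hx
        obtain ⟨j, hj, hr⟩ := h4 x hx
        exact ⟨j, List.mem_cons_of_mem _ hj, hr⟩
      · intro y hy
        rcases List.mem_cons.mp hy with rfl | hy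
        · exact List.mem_append_left _ hk
        · exact h5 y hy
  | case4 v vis k ks htodo hk v1 vis1 hmono heq htodo2 ih1 ih2 =>
      obtain ⟨D1, g1, g2, g3, g4, g5, g6⟩ := ih1
      obtain ⟨D2, f1, f2, f3, f4, f5, f6⟩ := ih2
      -- unfold one step of the recursion
      have he : (pvDfsGo g (k :: ks) htodo v vis).1
          = (pvDfsGo g ks (fun x hx => htodo x (List.mem_cons_of_mem _ hx)) v1 vis1).1 := by
        rw [pvDfsGo, heq]; simp [hk]
      have hadd : PySem.Set.add vis k = vis ++ [k] := PySem.Set.add_of_not_mem hk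
      -- decompose the dfs call's result via heq
      have hvis1 : vis1 = (vis ++ [k]) ++ D1 := by rw [← hadd, ← g1, heq]
      have hD : vis1 ++ D2 = vis ++ (k :: (D1 ++ D2)) := by rw [hvis1]; simp
      refine ⟨k :: (D1 ++ D2), ?_, ?_, ?_, ?_, ?_, ?_⟩
      · rw [he, f1, hD]
      · intro hv
        have hkv : k ∉ v := fun hkv => hk (hv k hkv)
        have haddv : PySem.Set.add v k = v ++ [k] := PySem.Set.add_of_not_mem hkv
        have hsub1 : ∀ x ∈ PySem.Set.add v k, x ∈ PySem.Set.add vis k := by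
          intro x hx
          rw [haddv] at hx
          rw [hadd]
          rcases List.mem_append.mp hx with hx | hx
          · exact List.mem_append_left _ (hv x hx)
          · exact List.mem_append_right _ hx
        have hv1 : v1 = (v ++ [k]) ++ D1 := by rw [← haddv, ← g2 hsub1, heq]
        have hsub2 : ∀ x ∈ v1, x ∈ vis1 := by
          intro x hx
          rw [hv1] at hx
          rw [hvis1]
          rcases List.mem_append.mp hx with hx | hx
          · rcases List.mem_append.mp hx with hx | hx
            · exact List.mem_append_left _ (List.mem_append_left _ (hv x hx))
            · exact List.mem_append_left _ (List.mem_append_right _ hx)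
          · exact List.mem_append_right _ hx
        rw [he, f2 hsub2, hv1]
        simp
      · intro hvnd
        have h1nd : (vis ++ [k]).Nodup := by
          rw [List.nodup_append]
          exact ⟨hvnd, List.nodup_singleton k, by
            intro x hx y hy rfl
            exact hk (by rwa [List.mem_singleton.mp hy] at hx)⟩
        have h2nd : vis1.Nodup := by
          rw [hvis1, ← hadd]
          exact g3 (by rw [hadd]; exact h1nd)
        have h3nd := f3 h2nd
        rw [← hD]
        exact h3nd
      · intro x hx
        rcases List.mem_cons.mp hx with rfl | hx
        · exact ⟨x, List.mem_cons_self, Relation.ReflTransGen.refl⟩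
        · rcases List.mem_append.mp hx with hx | hx
          · exact ⟨k, List.mem_cons_self, g4 x hx⟩
          · obtain ⟨j, hj, hr⟩ := f4 x hx
            exact ⟨j, List.mem_cons_of_mem _ hj, hr⟩
      · intro y hy
        rcases List.mem_cons.mp hy with rfl | hy
        · rw [← hD]
          rw [hvis1]
          exact List.mem_append_left _ (List.mem_append_left _ (List.mem_append_right _ (List.mem_singleton_self _)))
        · rw [← hD]
          exact f5 y hy
      · intro x hx y hy
        rw [← hD]
        rcases List.mem_cons.mp hx with rfl | hx
        · have := g5 y hy
          rw [hadd] at this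
          rw [← hvis1] at this
          exact List.mem_append_left _ this
        · rcases List.mem_append.mp hx with hx | hx
          · have := g6 x hx y hy
            rw [hadd, ← hvis1] at this
            exact List.mem_append_left _ this
          · exact f6 x hx y hy

theorem pvDfs_spec (g : PySem.Dict Int (List Int)) (node : Int) (v vis : List Int) :
    DfsP g node v vis :=
  pvDfs_from_go g node v vis
    (pvDfsGo_spec g (pvAdj g node) (pvAdj_subset_univ g node) v vis)

theorem pvBfs_spec (g : PySem.Dict Int (List Int)) :
    ∀ (queue vis : List Int), BfsP g queue vis := by
  intro queue vis
  induction queue, vis using pvBfs.induct g with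
  | case1 vis =>
      refine ⟨[], by simp [pvBfs], by simp, by simp, by simp, ?_⟩
      intro hinv x hx y hy
      simp only [List.append_nil] at hx ⊢
      rcases hinv x hx with h | h
      · cases h
      · exact h y hy
  | case2 vis node rest p ih0 ih =>
      obtain ⟨app, heq, hmem, hnd, hcomp⟩ := pvScan_spec (pvAdj g node) vis rest
      simp only [heq] at ih
      obtain ⟨D2, hvis2, hnd2, hsound2, hqadj2, hclosed2⟩ := ih
      have hstep : (pvBfs g (node :: rest) vis).1 = (pvBfs g (rest ++ app) (vis ++ app)).1 := by
        conv_lhs => rw [pvBfs]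
        show (pvBfs g (pvScan vis rest (pvAdj g node)).2 (pvScan vis rest (pvAdj g node)).1).1
            = (pvBfs g (rest ++ app) (vis ++ app)).1
        rw [heq]
      refine ⟨app ++ D2, ?_, ?_, ?_, ?_, ?_⟩
      · rw [hstep, hvis2, List.append_assoc]
      · intro hvnd
        rw [← List.append_assoc]
        apply hnd2
        rw [List.nodup_append]
        refine ⟨hvnd, hnd, ?_⟩
        intro x hx y hy rfl
        exact (hmem x hy).2 hx
      · intro x hx
        rcases List.mem_append.mp hx with hx | hx
        · exact ⟨node, List.mem_cons_self, Relation.ReflTransGen.single (hmem x hx).1⟩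
        · obtain ⟨q, hq, hr⟩ := hsound2 x hx
          rcases List.mem_append.mp hq with hq | hq
          · exact ⟨q, List.mem_cons_of_mem _ hq, hr⟩
          · exact ⟨node, List.mem_cons_self, Relation.ReflTransGen.head (hmem q hq).1 hr⟩
      · intro q hq y hy
        rw [← List.append_assoc]
        rcases List.mem_cons.mp hq with rfl | hq
        · exact List.mem_append_left _ (hcomp y hy)
        · exact hqadj2 q (List.mem_append_left _ hq) y hy
      · intro hinv x hx y hy
        rw [← List.append_assoc] at hx ⊢
        have hinv2 : ∀ z ∈ vis ++ app, z ∈ rest ++ app ∨ ∀ w ∈ pvAdj g z, w ∈ vis ++ app := by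
          intro z hz
          rcases List.mem_append.mp hz with hz | hz
          · rcases hinv z hz with h | h
            · rcases List.mem_cons.mp h with rfl | h
              · exact Or.inr (fun w hw => hcomp w hw)
              · exact Or.inl (List.mem_append_left _ h)
            · exact Or.inr (fun w hw => List.mem_append_left _ (h w hw))
          · exact Or.inl (List.mem_append_right _ hz)
        exact hclosed2 hinv2 x hx y hy

-- what one component-search produces, for each side
theorem pvDfs_run (g : PySem.Dict Int (List Int)) (hs : pvSymm g) {vis : List Int} {c : Int}
    (hcl : pvClosed g vis) (hnd : vis.Nodup) (hc : c ∉ vis) (hne : pvAdj g c ≠ []) :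
    ∃ D, (pvDfs g c PySem.Set.empty vis).1.2 = vis ++ D
      ∧ (pvDfs g c PySem.Set.empty vis).1.1 = D
      ∧ (vis ++ D).Nodup
      ∧ pvClosed g (vis ++ D)
      ∧ (∀ x, x ∈ vis ++ D ↔ x ∈ vis ∨ pvReach g c x)
      ∧ c ∈ D := by
  obtain ⟨D, h1, h2, h3, h4, h5, h6⟩ := pvDfs_spec g c PySem.Set.empty vis
  have hgrp : (pvDfs g c PySem.Set.empty vis).1.1 = D := by
    have := h2 (by intro x hx; cases hx)
    simpa using this
  have hclosed : pvClosed g (vis ++ D) := by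
    intro x hx y hy
    rcases List.mem_append.mp hx with hx | hx
    · exact List.mem_append_left _ (hcl x hx y hy)
    · exact h6 x hx y hy
  have hmem : ∀ x, x ∈ vis ++ D ↔ x ∈ vis ∨ pvReach g c x := by
    intro x
    constructor
    · intro hx
      rcases List.mem_append.mp hx with hx | hx
      · exact Or.inl hx
      · exact Or.inr (h4 x hx)
    · rintro (hx | hx)
      · exact List.mem_append_left _ hx
      · induction hx with
        | refl =>
            obtain ⟨k, hk⟩ := List.exists_mem_of_ne_nil _ hne
            exact hclosed k (h5 k hk) c (hs c k hk)
        | tail h1' h2' ih => exact hclosed _ ih _ h2'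
  refine ⟨D, h1, hgrp, h3 hnd, hclosed, hmem, ?_⟩
  have hcm : c ∈ vis ++ D := (hmem c).mpr (Or.inr Relation.ReflTransGen.refl)
  rcases List.mem_append.mp hcm with h | h
  · exact absurd h hc
  · exact h

theorem pvBfs_run (g : PySem.Dict Int (List Int)) (hs : pvSymm g) {vis : List Int} {c : Int}
    (hcl : pvClosed g vis) (hnd : vis.Nodup) (hc : c ∉ vis) (hne : pvAdj g c ≠ []) :
    ∃ D, (pvBfs g [c] vis).1 = vis ++ D
      ∧ (vis ++ D).Nodup
      ∧ pvClosed g (vis ++ D)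
      ∧ (∀ x, x ∈ vis ++ D ↔ x ∈ vis ∨ pvReach g c x)
      ∧ c ∈ D := by
  obtain ⟨D, h1, h2, h3, h4, h5⟩ := pvBfs_spec g [c] vis
  have hclosed : pvClosed g (vis ++ D) :=
    h5 (fun x hx => Or.inr (fun y hy => hcl x hx y hy))
  have hmem : ∀ x, x ∈ vis ++ D ↔ x ∈ vis ∨ pvReach g c x := by
    intro x
    constructor
    · intro hx
      rcases List.mem_append.mp hx with hx | hx
      · exact Or.inl hx
      · obtain ⟨q, hq, hr⟩ := h3 x hx
        rcases List.mem_singleton.mp hq with rfl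
        exact Or.inr hr
    · rintro (hx | hx)
      · exact List.mem_append_left _ hx
      · induction hx with
        | refl =>
            obtain ⟨k, hk⟩ := List.exists_mem_of_ne_nil _ hne
            exact hclosed k (h4 c (List.mem_singleton_self c) k hk) c (hs c k hk)
        | tail h1' h2' ih => exact hclosed _ ih _ h2'
  refine ⟨D, h1, h2 hnd, hclosed, hmem, ?_⟩
  have hcm : c ∈ vis ++ D := (hmem c).mpr (Or.inr Relation.ReflTransGen.refl)
  rcases List.mem_append.mp hcm with h | h
  · exact absurd h hc
  · exact h

-- the graph built from pair rows: adjacency characterisation, symmetry, key adjacency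
theorem pvAdj_fold (es : List (List Int)) :
    ∀ (d : PySem.Dict Int (List Int)) (u w : Int), (∀ r ∈ es, r.length = 2) →
      (w ∈ (es.foldl pvStep d).getD u [] ↔
        w ∈ d.getD u [] ∨ ∃ r ∈ es, r = [u, w] ∨ r = [w, u]) := by
  induction es with
  | nil => intro d u w _; simp
  | cons r es ih =>
      intro d u w hp
      obtain ⟨a, b, rfl⟩ : ∃ a b, r = [a, b] := by
        have := hp r List.mem_cons_self
        match r, this with
        | [a, b], _ => exact ⟨a, b, rfl⟩
      have hstep : w ∈ (pvStep d [a, b]).getD u [] ↔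
          w ∈ d.getD u [] ∨ (u = a ∧ w = b) ∨ (u = b ∧ w = a) := by
        simp only [pvStep, PySem.Dict.getD_modify]
        by_cases h1 : u = b <;> by_cases h2 : u = a <;> by_cases h3 : b = a <;>
          simp_all [List.mem_append]
      rw [List.foldl_cons, ih (pvStep d [a, b]) u w (fun r hr => hp r (List.mem_cons_of_mem _ hr)),
        hstep]
      simp only [List.mem_cons]
      constructor
      · rintro ((h | h) | ⟨r, hr, h⟩)
        · exact Or.inl h
        · rcases h with ⟨rfl, rfl⟩ | ⟨rfl, rfl⟩
          · exact Or.inr ⟨[u, w], Or.inl rfl, Or.inl rfl⟩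
          · exact Or.inr ⟨[w, u], Or.inl rfl, Or.inr rfl⟩
        · exact Or.inr ⟨r, Or.inr hr, h⟩
      · rintro (h | ⟨r, (rfl | hr), h⟩)
        · exact Or.inl (Or.inl h)
        · rcases h with h | h
          · obtain ⟨rfl, rfl⟩ : a = u ∧ b = w := by simpa using h
            exact Or.inl (Or.inr (Or.inl ⟨rfl, rfl⟩))
          · obtain ⟨rfl, rfl⟩ : a = w ∧ b = u := by simpa using h
            exact Or.inl (Or.inr (Or.inr ⟨rfl, rfl⟩))
        · exact Or.inr ⟨r, hr, h⟩

theorem pvAdj_mem (es : List (List Int)) (hp : ∀ r ∈ es, r.length = 2) (u w : Int) :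
    w ∈ pvAdj (pvGraph es) u ↔ ∃ r ∈ es, r = [u, w] ∨ r = [w, u] := by
  have := pvAdj_fold es PySem.Dict.empty u w hp
  unfold pvAdj pvGraph
  simpa [PySem.Dict.getD_empty] using this

theorem pvSymm_graph (es : List (List Int)) (hp : ∀ r ∈ es, r.length = 2) :
    pvSymm (pvGraph es) := by
  intro u w h
  rw [pvAdj_mem es hp] at *
  obtain ⟨r, hr, h⟩ := h
  exact ⟨r, hr, h.symm⟩

theorem pvKeys_nonempty_fold (es : List (List Int)) :
    ∀ (d : PySem.Dict Int (List Int)), (∀ c ∈ d.keys, d.getD c [] ≠ []) →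
      ∀ c ∈ (es.foldl pvStep d).keys, (es.foldl pvStep d).getD c [] ≠ [] := by
  induction es with
  | nil => intro d h; exact h
  | cons r es ih =>
      intro d h
      rw [List.foldl_cons]
      apply ih
      intro c hc
      match r with
      | [] => exact h c hc
      | [a] => exact h c hc
      | a :: b :: x :: t => exact h c hc
      | [a, b] =>
          simp only [pvStep] at hc ⊢
          simp only [PySem.Dict.getD_modify]
          by_cases h1 : c = b
          · simp [h1]
          · by_cases h2 : c = a
            · by_cases h3 : a = b <;> simp [h2, h3]
            · simp only [if_neg h1, if_neg h2]
              apply h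
              simp only [PySem.Dict.keys_modify, PySem.Dict.mem_keys_insert] at hc
              rcases hc with hx | hx | hx
              · exact absurd hx h1
              · exact absurd hx h2
              · exact hx

theorem pvKeys_nonempty (es : List (List Int)) :
    ∀ c ∈ (pvGraph es).keys, pvAdj (pvGraph es) c ≠ [] := by
  unfold pvGraph pvAdj
  apply pvKeys_nonempty_fold
  intro c hc
  simp [PySem.Dict.keys_empty] at hc


-- the per-component cost formulas agree for l ≥ 1
theorem pvCostEq (c_lib c_road l : Int) (hl : 1 ≤ l) :
    min (c_lib + (l - 1) * c_road) (c_lib * l) = c_lib + (l - 1) * min c_road c_lib := by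
  have h0 : (0:Int) ≤ l - 1 := by omega
  have h3 : c_lib * l = c_lib + (l - 1) * c_lib := by ring
  rcases le_total c_road c_lib with h | h
  · have h2 : (l - 1) * c_road ≤ (l - 1) * c_lib := mul_le_mul_of_nonneg_left h h0
    rw [min_eq_left h, min_eq_left (by linarith)]
  · have h2 : (l - 1) * c_lib ≤ (l - 1) * c_road := mul_le_mul_of_nonneg_left h h0
    rw [min_eq_right h, min_eq_right (by linarith)]
    linarith

-- the two outer loops stay in lockstep
theorem pvLoop_eq (g : PySem.Dict Int (List Int)) (c_lib c_road : Int) (hs : pvSymm g) :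
    ∀ (ks : List Int) (t : Int) (visA visB : List Int),
      (∀ c ∈ ks, pvAdj g c ≠ []) →
      (∀ x, x ∈ visA ↔ x ∈ visB) → visA.Nodup → visB.Nodup → pvClosed g visA →
      (ks.foldl (pvStepA g c_lib c_road) (t, visA)).1
          = (ks.foldl (pvStepB g c_lib c_road) (t, visB)).1
      ∧ (∀ x, x ∈ (ks.foldl (pvStepA g c_lib c_road) (t, visA)).2
            ↔ x ∈ (ks.foldl (pvStepB g c_lib c_road) (t, visB)).2)
      ∧ (ks.foldl (pvStepA g c_lib c_road) (t, visA)).2.Nodup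
      ∧ (ks.foldl (pvStepB g c_lib c_road) (t, visB)).2.Nodup := by
  intro ks
  induction ks with
  | nil =>
      intro t visA visB _ hiff ndA ndB _
      exact ⟨rfl, hiff, ndA, ndB⟩
  | cons c ks ih =>
      intro t visA visB hks hiff ndA ndB hclA
      by_cases hm : c ∈ visA
      · have hmB : c ∈ visB := (hiff c).mp hm
        have hA : PySem.Set.contains visA c = true := (PySem.Set.contains_iff _ _).mpr hm
        have hB : PySem.Set.contains visB c = true := (PySem.Set.contains_iff _ _).mpr hmB
        rw [List.foldl_cons, List.foldl_cons,
          show pvStepA g c_lib c_road (t, visA) c = (t, visA) by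
            simp only [pvStepA]; rw [if_pos hA],
          show pvStepB g c_lib c_road (t, visB) c = (t, visB) by
            simp only [pvStepB]; rw [if_pos hB]]
        exact ih t visA visB (fun x hx => hks x (List.mem_cons_of_mem _ hx)) hiff ndA ndB hclA
      · have hmB : c ∉ visB := fun h => hm ((hiff c).mpr h)
        have hA : PySem.Set.contains visA c = false := by
          rw [Bool.eq_false_iff]; intro h; exact hm ((PySem.Set.contains_iff _ _).mp h)
        have hB : PySem.Set.contains visB c = false := by
          rw [Bool.eq_false_iff]; intro h; exact hmB ((PySem.Set.contains_iff _ _).mp h)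
        have hclB : pvClosed g visB := fun x hx y hy =>
          (hiff y).mp (hclA x ((hiff x).mpr hx) y hy)
        have hne : pvAdj g c ≠ [] := hks c List.mem_cons_self
        obtain ⟨DA, a1, a2, a3, a4, a5, a6⟩ := pvDfs_run g hs hclA ndA hm hne
        obtain ⟨DB, b1, b2, b3, b4, b5⟩ := pvBfs_run g hs hclB ndB hmB hne
        have hiff2 : ∀ x, x ∈ visA ++ DA ↔ x ∈ visB ++ DB := by
          intro x
          rw [a5 x, b4 x, hiff x]
        have hlenV : visA.length = visB.length :=
          ((List.perm_ext_iff_of_nodup ndA ndB).mpr hiff).length_eq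
        have hlenAB : (visA ++ DA).length = (visB ++ DB).length :=
          ((List.perm_ext_iff_of_nodup a3 b2).mpr hiff2).length_eq
        have hlenD : DA.length = DB.length := by
          simp only [List.length_append] at hlenAB
          omega
        have hl1 : (1 : Int) ≤ PySem.Set.len DA := by
          have : 0 < DA.length := List.length_pos_of_mem a6
          simp only [PySem.Set.len]
          exact_mod_cast this
        have hlen : PySem.Set.len DA = PySem.Set.len (visB ++ DB) - PySem.Set.len visB := by
          simp only [PySem.Set.len, List.length_append]
          push_cast
          omega
        rw [List.foldl_cons, List.foldl_cons,
          show pvStepA g c_lib c_road (t, visA) c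
              = (t + min (c_lib + (PySem.Set.len DA - 1) * c_road) (c_lib * PySem.Set.len DA),
                  visA ++ DA) by
            simp only [pvStepA]; rw [if_neg (by rw [hA]; simp), a2, a1],
          show pvStepB g c_lib c_road (t, visB) c
              = (t + (c_lib + (PySem.Set.len (visB ++ DB) - PySem.Set.len visB - 1)
                    * min c_road c_lib), visB ++ DB) by
            simp only [pvStepB]; rw [if_neg (by rw [hB]; simp), b1],
          pvCostEq c_lib c_road _ hl1, hlen]
        exact ih _ (visA ++ DA) (visB ++ DB)
          (fun x hx => hks x (List.mem_cons_of_mem _ hx)) hiff2 a3 b2 a4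

-- ===== VERDICT (by name: the statement is the Claim_ definition above) =====
theorem roadsAndLibraries_spec : Claim_equal_roadsAndLibraries := by
  intro n c_lib c_road c_cities _ hpre
  unfold Spec_roadsAndLibraries roadsAndLibraries roadsAndLibraries_alt
  have hs := pvSymm_graph c_cities hpre
  have hk := pvKeys_nonempty c_cities
  obtain ⟨h1, h2, h3, h4⟩ := pvLoop_eq (pvGraph c_cities) c_lib c_road hs
    (pvGraph c_cities).keys 0 PySem.Set.empty PySem.Set.empty hk
    (fun x => Iff.rfl) List.nodup_nil List.nodup_nil (fun x hx => by cases hx)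
  have hperm : (((pvGraph c_cities).keys.foldl (pvStepA (pvGraph c_cities) c_lib c_road) (0, PySem.Set.empty)).2).Perm
      (((pvGraph c_cities).keys.foldl (pvStepB (pvGraph c_cities) c_lib c_road) (0, PySem.Set.empty)).2) :=
    (List.perm_ext_iff_of_nodup h3 h4).mpr h2
  have hlen := hperm.length_eq
  simp only [PySem.Set.len]
  rw [h1, hlen]
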